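-- pv_equiv track=rewrite | github.com/nikkhaho/twitter | get_from_text.py | get_idd
-- ===== SOURCE A (Python) =====
-- def get_idd(tw):
--  b="@"
--  c=""
--  d=[]
--  bol=0
--  for j in tw:
--     if j==b:
--      d.append(c)
--      bol=1
--
--      c=""
--     if bol==1:
--       if j==" " or j==":" or j=="\'" or j=="\\":
--        bol=0
--
--        continue
--       c=c+j
--  d.append(c)
--  return d[1]
-- ===== SOURCE B (Python) =====
-- def get_idd(tw):
--     i = tw.index("@")
--     j = i + 1
--     while j < len(tw) and tw[j] not in "@ :'\\":
--         j += 1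
--     return tw[i:j]
-- ===== Notes on version B (the rewrite author's own statement) =====
-- stated objective: idiomatic
-- what changed: Replaces A's running three-variable state machine (accumulator string, list of tokens, boolean flag) over the whole text by a find-then-extract decomposition: locate the first '@' with str.index, scan forward to the first terminator, and return one slice.
import Mathlib
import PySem

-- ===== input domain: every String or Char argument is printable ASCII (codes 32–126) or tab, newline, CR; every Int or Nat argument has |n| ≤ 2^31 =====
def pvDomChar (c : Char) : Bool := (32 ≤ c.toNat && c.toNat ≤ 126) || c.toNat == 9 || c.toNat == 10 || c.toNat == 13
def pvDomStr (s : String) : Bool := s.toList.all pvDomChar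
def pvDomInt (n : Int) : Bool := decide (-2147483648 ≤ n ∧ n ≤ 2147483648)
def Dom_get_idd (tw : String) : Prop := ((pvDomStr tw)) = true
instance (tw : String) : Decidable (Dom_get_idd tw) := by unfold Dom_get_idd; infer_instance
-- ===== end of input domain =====

-- B replaces A's running state machine by an idiomatic find-then-slice extraction; same O(n) cost.

-- ===== PORT A =====
-- loop body of A, transliterated: state is (c, d, bol)
def pvStepA (s : List Char × List (List Char) × Int) (j : Char) :
    List Char × List (List Char) × Int :=
  let c := s.1; let d := s.2.1; let bol := s.2.2
  let s1 := if j == '@' then (([] : List Char), d ++ [c], (1 : Int)) else (c, d, bol)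
  let c := s1.1; let d := s1.2.1; let bol := s1.2.2
  if bol == 1 then
    if j == ' ' || j == ':' || j == '\'' || j == '\\' then (c, d, (0 : Int))
    else (c ++ [j], d, bol)
  else (c, d, bol)

def get_idd (tw : String) : String :=
  let st := tw.toList.foldl pvStepA ([], [], 0)
  -- d.append(c); return d[1] — Pre_get_idd guarantees the index is in range (else Python raises IndexError)
  ((PySem.List.pyGet? (st.2.1 ++ [st.1]) 1).getD []).asString

-- ===== PORT B =====
-- the while-loop of Source B: advance j while tw[j] is not a terminator
def pvScanB (l : List Char) (j : Nat) : Nat :=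
  if h : j < l.length then
    if l[j] == '@' || l[j] == ' ' || l[j] == ':' || l[j] == '\'' || l[j] == '\\' then j
    else pvScanB l (j + 1)
  else j
termination_by l.length - j

def get_idd_alt (tw : String) : String :=
  let l := tw.toList
  -- tw.index("@"); Pre_get_idd guarantees a hit (else Python raises ValueError)
  let i := (PySem.List.index? l '@').getD 0
  let j := pvScanB l (i + 1)
  (PySem.List.slice l (some (i : Int)) (some (j : Int))).asString

-- ===== PRECONDITION & SPEC =====
-- Pre_ excludes texts without '@': there A raises IndexError (d[1] out of range) and B raises ValueError.
def Pre_get_idd (tw : String) : Prop := '@' ∈ tw.toList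
instance (tw : String) : Decidable (Pre_get_idd tw) := by unfold Pre_get_idd; infer_instance
def pvWitness_get_idd : String := "hi @bob: yo"

def Spec_get_idd (tw : String) (out : String) : Prop := out = get_idd_alt tw
instance (tw : String) (out : String) : Decidable (Spec_get_idd tw out) := by unfold Spec_get_idd; infer_instance

-- ===== CLAIM (what is proved, stated in full; the proofs are below) =====
def Claim_equal_get_idd : Prop := ∀ (tw : String), Dom_get_idd tw → Pre_get_idd tw → Spec_get_idd tw (get_idd tw)

-- ===== LEMMAS AND PROOFS =====

-- the five-character terminator set, and the token after the first '@'
def pvStop (j : Char) : Bool :=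
  j == '@' || j == ' ' || j == ':' || j == '\'' || j == '\\'

def pvTake (r : List Char) : List Char := r.takeWhile (fun j => !pvStop j)

-- d[1] of the final (d ++ [c]) list, as A reads it
def pvRes (st : List Char × List (List Char) × Int) : List Char :=
  (PySem.List.pyGet? (st.2.1 ++ [st.1]) 1).getD []

theorem pvStepA_d_mono (l : List Char) (c : List Char) (d : List (List Char)) (bol : Int) :
    ∃ e, (List.foldl pvStepA (c, d, bol) l).2.1 = d ++ e := by
  induction l generalizing c d bol with
  | nil => exact ⟨[], by simp⟩
  | cons j r ih =>
    simp only [List.foldl_cons]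
    by_cases h : j = '@'
    · subst h
      have h1 : pvStepA (c, d, bol) '@' = (['@'], d ++ [c], 1) := by simp [pvStepA]
      rw [h1]
      rcases ih ['@'] (d ++ [c]) 1 with ⟨e, he⟩
      exact ⟨[c] ++ e, by simpa [List.append_assoc] using he⟩
    · by_cases hb : bol = 1
      · by_cases ht : (j == ' ' || j == ':' || j == '\'' || j == '\\') = true
        · rcases ih c d 0 with ⟨e, he⟩
          simp_all [pvStepA]
        · rcases ih (c ++ [j]) d bol with ⟨e, he⟩
          simp_all [pvStepA]
      · rcases ih c d bol with ⟨e, he⟩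
        simp_all [pvStepA]

theorem pvRes_fixed (l : List Char) (c d0 d1 : List Char) (drest : List (List Char)) (bol : Int) :
    pvRes (List.foldl pvStepA (c, d0 :: d1 :: drest, bol) l) = d1 := by
  rcases pvStepA_d_mono l c (d0 :: d1 :: drest) bol with ⟨e, he⟩
  unfold pvRes
  rcases h : List.foldl pvStepA (c, d0 :: d1 :: drest, bol) l with ⟨c', d', bol'⟩
  rw [h] at he
  simp at he ⊢
  rw [he]
  have hpos : (0 : Int) ≤ (drest.length : Int) + ((e.length : Int) + 1) := by positivity
  simp [hpos]

-- phase after the token has been closed: result is the frozen token c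
theorem pvRes_phase2 (r : List Char) (c : List Char) :
    pvRes (List.foldl pvStepA (c, [[]], 0) r) = c := by
  induction r generalizing c with
  | nil => simp [pvRes, PySem.List.pyGet?, PySem.List.pyIdx?]
  | cons j r ih =>
    by_cases h : j = '@'
    · subst h
      simp only [List.foldl_cons]
      have h1 : pvStepA (c, [[]], 0) '@' = (['@'], [[], c], 1) := by simp [pvStepA]
      rw [h1]
      exact pvRes_fixed r _ _ _ _ _
    · simp only [List.foldl_cons]
      have : pvStepA (c, [[]], 0) j = (c, [[]], 0) := by
        simp [pvStepA, h]
      rw [this]; exact ih c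

-- phase while the token is open: result is c plus the rest of the token
theorem pvRes_phase1 (r : List Char) (c : List Char) :
    pvRes (List.foldl pvStepA (c, [[]], 1) r) = c ++ pvTake r := by
  induction r generalizing c with
  | nil => simp [pvRes, pvTake, PySem.List.pyGet?, PySem.List.pyIdx?]
  | cons j r ih =>
    simp only [List.foldl_cons]
    by_cases h : j = '@'
    · subst h
      have h1 : pvStepA (c, [[]], 1) '@' = (['@'], [[], c], 1) := by
        simp [pvStepA]
      rw [h1, pvRes_fixed]
      simp [pvTake, pvStop]
    · by_cases ht : (j == ' ' || j == ':' || j == '\'' || j == '\\') = true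
      · have h1 : pvStepA (c, [[]], 1) j = (c, [[]], 0) := by
          simp [pvStepA, h, ht]
        rw [h1, pvRes_phase2]
        have : pvStop j = true := by simp [pvStop, h]; simpa using ht
        simp [pvTake, this]
      · have h1 : pvStepA (c, [[]], 1) j = (c ++ [j], [[]], 1) := by
          simp [pvStepA, h] at ht ⊢ <;> simp_all
        rw [h1, ih]
        have : pvStop j = false := by simp [pvStop, h]; simpa using ht
        simp [pvTake, this]

theorem pvPhase0 (p : List Char) (hp : '@' ∉ p) :
    List.foldl pvStepA (([] : List Char), ([] : List (List Char)), (0 : Int)) p = ([], [], 0) := by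
  induction p with
  | nil => rfl
  | cons j r ih =>
    simp only [List.mem_cons, not_or] at hp
    have h1 : pvStepA ([], [], 0) j = ([], [], 0) := by
      simp [pvStepA, Ne.symm hp.1]
    simp only [List.foldl_cons, h1]
    exact ih hp.2

-- A computed on the canonical decomposition l = p ++ '@' :: r, '@' ∉ p
theorem getA_char (p r : List Char) (hp : '@' ∉ p) :
    pvRes (List.foldl pvStepA ([], [], 0) (p ++ '@' :: r)) = '@' :: pvTake r := by
  rw [List.foldl_append, pvPhase0 p hp]
  simp only [List.foldl_cons]
  have h1 : pvStepA ([], [], 0) '@' = (['@'], [[]], 1) := by simp [pvStepA]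
  rw [h1, pvRes_phase1]
  simp

-- B's scan computes the length of the token tail
theorem pvScanB_eq (l : List Char) (j : Nat) (hj : j ≤ l.length) :
    pvScanB l j = j + (pvTake (l.drop j)).length := by
  by_cases h : j < l.length
  · rw [pvScanB]
    rw [dif_pos h]
    have hd : l.drop j = l[j] :: l.drop (j + 1) := List.drop_eq_getElem_cons h
    by_cases hs : pvStop l[j] = true
    · rw [if_pos (by simpa [pvStop] using hs)]
      rw [hd]
      simp [pvTake, List.takeWhile_cons, hs]
    · rw [if_neg (by simpa [pvStop] using hs)]
      rw [hd, pvScanB_eq l (j + 1) (by omega)]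
      simp only [pvTake, List.takeWhile_cons]
      simp [hs]
      omega
  · have hje : j = l.length := by omega
    subst hje
    rw [pvScanB]
    rw [dif_neg (by omega)]
    simp [pvTake]
termination_by l.length - j

theorem getB_char (tw : String) (p r : List Char) (h : tw.toList = p ++ '@' :: r)
    (hp : '@' ∉ p) :
    get_idd_alt tw = ('@' :: pvTake r).asString := by
  unfold get_idd_alt
  rw [h]
  dsimp only
  have hi : PySem.List.index? (p ++ '@' :: r) '@' = some p.length := by
    exact (PySem.List.index?_eq_some_iff _ _ _).mpr ⟨p, r, rfl, rfl, hp⟩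
  rw [hi]
  simp only [Option.getD_some]
  have hscan : pvScanB (p ++ '@' :: r) (p.length + 1) =
      (p.length + 1) + (pvTake r).length := by
    have h2 := pvScanB_eq (p ++ '@' :: r) (p.length + 1) (by simp)
    have hd : (p ++ '@' :: r).drop (p.length + 1) = r := by
      simp [List.drop_append]
    rw [hd] at h2
    exact h2
  rw [hscan]
  have hsl : PySem.List.slice (p ++ '@' :: r) (some (p.length : Int))
      (some (((p.length + 1) + (pvTake r).length : Nat) : Int)) =
      (((p ++ '@' :: r).drop p.length).take ((p.length + 1 + (pvTake r).length) - p.length)) := by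
    have h3 := PySem.List.slice_natCast (p ++ '@' :: r) p.length (p.length + 1 + (pvTake r).length)
    simpa using h3
  rw [hsl]
  have hd2 : (p ++ '@' :: r).drop p.length = '@' :: r := by
    simp [List.drop_append]
  rw [hd2]
  have hn : p.length + 1 + (pvTake r).length - p.length = (pvTake r).length + 1 := by omega
  rw [hn]
  have hpre : r.take (pvTake r).length = pvTake r := by
    have h4 : pvTake r <+: r := by simpa [pvTake] using List.takeWhile_prefix (fun j => !pvStop j) (l := r)
    exact (List.prefix_iff_eq_take.mp h4).symm
  simp [List.take_succ_cons, hpre]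

theorem getA_char' (tw : String) (p r : List Char) (h : tw.toList = p ++ '@' :: r)
    (hp : '@' ∉ p) :
    get_idd tw = ('@' :: pvTake r).asString := by
  unfold get_idd
  rw [h]
  have := getA_char p r hp
  unfold pvRes at this
  simp only at this ⊢
  rw [this]

-- ===== VERDICT (by name: the statement is the Claim_ definition above) =====
theorem get_idd_spec : Claim_equal_get_idd := by
  unfold Claim_equal_get_idd
  intro tw _ hpre
  unfold Spec_get_idd
  have hmem : '@' ∈ tw.toList := hpre
  have hi : ∃ k, PySem.List.index? tw.toList '@' = some k := by
    have := (PySem.List.index?_isSome_iff (xs := tw.toList) (v := '@')).mpr hmem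
    exact Option.isSome_iff_exists.mp this
  rcases hi with ⟨k, hk⟩
  rcases (PySem.List.index?_eq_some_iff _ _ _).mp hk with ⟨p, r, hdec, _, hp⟩
  rw [getA_char' tw p r hdec hp, getB_char tw p r hdec hp]
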